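-- pv_equiv track=rewrite | github.com/Cwd1102/Class | Cmsc201/Projects/project 2/p2 backup.py | list_of_student_no_show
-- ===== SOURCE A (Python) =====
-- def list_students_attendance_count(numbers , data):
--     name = []
--
--     for names in data:
--         if len(data[names]) >= numbers:
--             name.append(names)
--     return name
--
-- def list_of_student_no_show(classes_attended , roster , data):
--     classes_attended = 2
--     attendance = list_students_attendance_count( classes_attended , data)
--     names = []
--     for name in roster:
--         if name not in attendance:
--             names.append(name)
--     return names
-- ===== SOURCE B (Python) =====
-- def list_of_student_no_show(classes_attended, roster, data):
--     # single pass over roster with direct dict lookup (threshold hardcoded to 2, as in A)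
--     return [name for name in roster if name not in data or len(data[name]) < 2]
-- ===== Notes on version B (the rewrite author's own statement) =====
-- stated objective: faster
-- what changed: B drops A's intermediate 'attendance' list and the O(D) membership scan per roster name, deciding each name in one pass by a direct O(1) dict lookup (missing or fewer than 2 attendances = no-show).
import Mathlib
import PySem

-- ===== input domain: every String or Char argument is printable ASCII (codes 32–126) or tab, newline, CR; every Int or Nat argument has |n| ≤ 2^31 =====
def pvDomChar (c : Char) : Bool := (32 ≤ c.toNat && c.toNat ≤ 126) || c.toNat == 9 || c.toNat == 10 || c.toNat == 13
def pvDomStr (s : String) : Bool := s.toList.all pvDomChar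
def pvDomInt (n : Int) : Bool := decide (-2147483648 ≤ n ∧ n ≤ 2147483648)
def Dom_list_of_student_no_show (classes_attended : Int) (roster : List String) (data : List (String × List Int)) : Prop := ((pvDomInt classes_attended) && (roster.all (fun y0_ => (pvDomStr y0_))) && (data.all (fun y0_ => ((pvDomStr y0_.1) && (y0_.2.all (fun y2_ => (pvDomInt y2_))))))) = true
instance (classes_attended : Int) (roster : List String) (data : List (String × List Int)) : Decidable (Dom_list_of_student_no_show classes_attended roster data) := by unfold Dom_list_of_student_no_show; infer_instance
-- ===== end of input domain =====

-- B drops A's intermediate attendance list and per-name membership scan: one pass over roster with a direct dict lookup (objective: simpler).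
-- ===== PORT A =====
-- 'for names in data: if len(data[names]) >= numbers: name.append(names)'  (dict iteration = keys in order; data[names] = first-match lookup on the association list)
def list_students_attendance_count (numbers : Int) (data : List (String × List Int)) : List String :=
  data.foldl (fun name p =>
    if numbers ≤ ((((data.find? (fun q => q.1 == p.1)).map (·.2)).getD []).length : Int)
    then name ++ [p.1] else name) []

def list_of_student_no_show (classes_attended : Int) (roster : List String) (data : List (String × List Int)) : List String :=
  let classes_attended : Int := 2
  let attendance := list_students_attendance_count classes_attended data
  roster.foldl (fun names name => if name ∉ attendance then names ++ [name] else names) []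

-- ===== PORT B =====
def list_of_student_no_show_alt (classes_attended : Int) (roster : List String) (data : List (String × List Int)) : List String :=
  roster.filter (fun name =>
    match data.find? (fun q => q.1 == name) with
    | none => true
    | some q => decide ((q.2.length : Int) < 2))

-- ===== PRECONDITION & SPEC =====
-- Pre_ excludes association lists with duplicate keys, which do not correspond to any Python dict
-- (Python collapses duplicates, keeping the last value; the assoc-list behaviour there is accidental).
def Pre_list_of_student_no_show (classes_attended : Int) (roster : List String) (data : List (String × List Int)) : Prop :=
  (data.map Prod.fst).Nodup
instance (classes_attended : Int) (roster : List String) (data : List (String × List Int)) : Decidable (Pre_list_of_student_no_show classes_attended roster data) := by unfold Pre_list_of_student_no_show; infer_instance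
def pvWitness_list_of_student_no_show : Int × List String × (List (String × List Int)) :=
  (0, ["alice", "bob"], [("alice", [1, 2]), ("bob", [5])])
def Spec_list_of_student_no_show (classes_attended : Int) (roster : List String) (data : List (String × List Int)) (out : List String) : Prop := out = list_of_student_no_show_alt classes_attended roster data
instance (classes_attended : Int) (roster : List String) (data : List (String × List Int)) (out : List String) : Decidable (Spec_list_of_student_no_show classes_attended roster data out) := by unfold Spec_list_of_student_no_show; infer_instance

-- ===== CLAIM (what is proved, stated in full; the proofs are below) =====
def Claim_equal_list_of_student_no_show : Prop := ∀ (classes_attended : Int) (roster : List String) (data : List (String × List Int)), Dom_list_of_student_no_show classes_attended roster data → Pre_list_of_student_no_show classes_attended roster data → Spec_list_of_student_no_show classes_attended roster data (list_of_student_no_show classes_attended roster data)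

-- ===== LEMMAS AND PROOFS =====

-- ===== VERDICT (by name: the statement is the Claim_ definition above) =====
-- loop shape: 'for x in l: if p(x): out.append(f(x))' with a Prop test
theorem foldl_append_ite_map {α β : Type} (p : α → Prop) [DecidablePred p] (f : α → β)
    (l : List α) (acc : List β) :
    l.foldl (fun acc x => if p x then acc ++ [f x] else acc) acc
      = acc ++ (l.filter (fun x => decide (p x))).map f := by
  induction l generalizing acc with
  | nil => simp
  | cons x l ih =>
    simp only [List.foldl_cons, List.filter_cons]
    by_cases h : p x <;> simp [h, ih]

-- membership in A's attendance list, characterised by a direct first-match lookup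
theorem mem_attendance_iff (data : List (String × List Int)) (name : String) :
    name ∈ list_students_attendance_count 2 data ↔
      ∃ q ∈ data, q.1 = name ∧
        2 ≤ ((((data.find? (fun r => r.1 == name)).map (·.2)).getD []).length : Int) := by
  unfold list_students_attendance_count
  rw [foldl_append_ite_map
      (p := fun p => 2 ≤ ((((data.find? (fun q => q.1 == p.1)).map (·.2)).getD []).length : Int))
      (f := Prod.fst)]
  simp only [List.nil_append, List.mem_map, List.mem_filter, decide_eq_true_eq]
  constructor
  · rintro ⟨q, ⟨hq, hle⟩, rfl⟩
    exact ⟨q, hq, rfl, hle⟩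
  · rintro ⟨q, hq, rfl, hle⟩
    exact ⟨q, ⟨hq, hle⟩, rfl⟩

theorem list_of_student_no_show_spec : Claim_equal_list_of_student_no_show := by
  intro classes_attended roster data _ _
  unfold Spec_list_of_student_no_show list_of_student_no_show list_of_student_no_show_alt
  rw [PySem.List.foldl_append_ite_eq_filter]
  simp only [List.nil_append]
  apply List.filter_congr
  intro name _
  rcases hfind : data.find? (fun q => q.1 == name) with _ | q
  · -- no entry with this key: name is in neither side's no-show test's complement
    have hnone : ∀ q ∈ data, q.1 ≠ name := by
      intro q hq
      have := List.find?_eq_none.mp hfind q hq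
      simpa using this
    have hmem : name ∉ list_students_attendance_count 2 data := by
      rw [mem_attendance_iff]
      rintro ⟨q, hq, hqi, -⟩
      exact hnone q hq hqi
    simp [hmem, hfind]
  · -- q is the first entry with key name
    have hpq : q.1 = name := by
      have := List.find?_some hfind
      simpa using this
    have hq : q ∈ data := List.mem_of_find?_eq_some hfind
    have hmem : name ∈ list_students_attendance_count 2 data ↔ 2 ≤ (q.2.length : Int) := by
      rw [mem_attendance_iff]
      constructor
      · rintro ⟨r, _, -, hle⟩
        simpa [hfind] using hle
      · intro hle
        exact ⟨q, hq, hpq, by simpa [hfind] using hle⟩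
    by_cases h2 : 2 ≤ (q.2.length : Int)
    · have : name ∈ list_students_attendance_count 2 data := hmem.mpr h2
      simp [this, hfind]
      omega
    · have : name ∉ list_students_attendance_count 2 data := fun h => h2 (hmem.mp h)
      simp [this, hfind]
      omega
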